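-- pv_equiv track=rewrite | github.com/jtn0123/GOES_VFI | fix_long_lines_enhanced.py | fix_fstring_line
-- ===== SOURCE A (Python) =====
-- MAX_LINE_LENGTH = 88
--
-- def fix_fstring_line(line: str, indent: str) -> str:
--     """Fix a long f-string line by splitting it into multiple concatenated strings."""
--     # If it's an f-string
--     if 'f"' in line or "f'" in line:
--         # Determine the main string delimiter used
--         delimiter = '"' if 'f"' in line else "'"
--
--         # Try to find a good breaking point (prefer spaces)
--         max_segment_length = MAX_LINE_LENGTH - len(indent) - 3  # Account for f", continuation char and indentation
--
--         # Extract the string part from the f-string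
--         string_start = line.index(f'f{delimiter}') + 2
--         string_end = line.rindex(delimiter)
--
--         # Get the prefix before the f-string
--         prefix = line[:string_start - 2]
--
--         # Get the suffix after the f-string
--         suffix = line[string_end + 1:]
--
--         # Extract the string content
--         content = line[string_start:string_end]
--
--         # Find good break points (prefer after punctuation and spaces)
--         break_points = []
--         for i in range(min(max_segment_length, len(content) - 1), 0, -1):
--             if content[i] in ' .,;:)]}':
--                 break_points.append(i + 1)
--
--         # If no good break points found, just break at the maximum length
--         if not break_points:
--             break_points = [min(max_segment_length, len(content))]
--
--         break_point = break_points[0]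
--
--         # Split the string
--         first_part = content[:break_point]
--         second_part = content[break_point:]
--
--         # Create the split line with proper continuation
--         # Make sure to use both f-strings for both parts to handle variables correctly
--         # We need to check for edge cases where placeholders would be split
--         if '{' in first_part and '}' not in first_part:
--             # Search for the nearest closing brace in the second part
--             brace_pos = second_part.find('}')
--             if brace_pos >= 0:
--                 # Move the variable placeholder to the first part
--                 brace_pos += 1  # Include the closing brace
--                 first_part += second_part[:brace_pos]
--                 second_part = second_part[brace_pos:]
--
--         result = f"{prefix}f{delimiter}{first_part}{delimiter} \\\n{indent}f{delimiter}{second_part}{delimiter}{suffix}"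
--
--         # If the result is still too long, we might need to recursively split again
--         if len(result.split('\n')[-1]) > MAX_LINE_LENGTH:
--             # Process the newly created line (split again if needed)
--             split_lines = result.split('\n')
--             last_line = split_lines[-1]
--             fixed_last_line = fix_fstring_line(last_line, indent)
--
--             if '\n' in fixed_last_line:
--                 # Return all previous lines plus the newly split lines
--                 return '\n'.join(split_lines[:-1] + fixed_last_line.split('\n'))
--             else:
--                 # Just replace the last line
--                 split_lines[-1] = fixed_last_line
--                 return '\n'.join(split_lines)
--
--         return result
--
--     return line
-- ===== SOURCE B (Python) =====
-- MAX_LINE_LENGTH = 88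
--
-- _BREAK_CHARS = ' .,;:)]}'
--
--
-- def _break_index(content, limit):
--     """Largest i in [1, min(limit, len(content)-1)] with a break char, +1; else min(limit, len(content))."""
--     i = min(limit, len(content) - 1)
--     while i > 0:
--         if content[i] in _BREAK_CHARS:
--             return i + 1
--         i -= 1
--     return min(limit, len(content))
--
--
-- def _split_once(line, indent):
--     """One split of an f-string line into a two-line continuation, via partition/rpartition."""
--     delimiter = '"' if 'f"' in line else "'"
--     prefix, _, rest = line.partition('f' + delimiter)
--     content, _, suffix = rest.rpartition(delimiter)
--     bp = _break_index(content, MAX_LINE_LENGTH - len(indent) - 3)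
--     first, second = content[:bp], content[bp:]
--     head, brace, tail = second.partition('}')
--     if '{' in first and '}' not in first and brace:
--         first, second = first + head + brace, tail
--     return (prefix + 'f' + delimiter + first + delimiter + ' \\\n'
--             + indent + 'f' + delimiter + second + delimiter + suffix)
--
--
-- def fix_fstring_line(line: str, indent: str) -> str:
--     """Iterative: accumulate finished lines, re-split the trailing line while needed."""
--     if 'f"' not in line and "f'" not in line:
--         return line
--     done = []
--     current = line
--     while True:
--         parts = _split_once(current, indent).split('\n')
--         done.extend(parts[:-1])
--         current = parts[-1]
--         if len(current) <= MAX_LINE_LENGTH or ('f"' not in current and "f'" not in current):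
--             return '\n'.join(done + [current])
-- ===== Notes on version B (the rewrite author's own statement) =====
-- stated objective: alternative
-- what changed: B replaces A's index/rindex-plus-slicing arithmetic by partition/rpartition splits, A's break-point search (build the list of all candidate break points, then take its head) by an early-return downward scan, and A's tail self-recursion on the rejoined last line by a flat iterative loop that accumulates finalized lines and re-splits only the current last line, joining once at the end.
import Mathlib
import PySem

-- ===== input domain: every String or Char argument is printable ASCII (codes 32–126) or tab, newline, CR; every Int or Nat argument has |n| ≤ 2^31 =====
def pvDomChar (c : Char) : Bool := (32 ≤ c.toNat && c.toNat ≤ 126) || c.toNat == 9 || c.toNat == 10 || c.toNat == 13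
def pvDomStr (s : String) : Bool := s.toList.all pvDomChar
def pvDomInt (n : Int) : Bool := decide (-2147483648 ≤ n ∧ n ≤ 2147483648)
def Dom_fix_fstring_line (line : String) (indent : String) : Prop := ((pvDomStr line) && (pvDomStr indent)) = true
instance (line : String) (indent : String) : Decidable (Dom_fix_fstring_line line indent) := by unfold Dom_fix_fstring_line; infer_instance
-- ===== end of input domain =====

-- B replaces A's index/rindex slicing arithmetic by partition/rpartition splits, A's
-- break-point list building (collect all candidates, take the head) by an early-return
-- downward scan, and A's self-recursion on the rejoined last line by a flat accumulator
-- loop; objective: alternative decomposition, A = B proved on every input.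

-- ===== PORT A =====
-- 'f"' in line or "f'" in line
def pvHasF (line : String) : Bool :=
  PySem.Str.isIn "f\"" line || PySem.Str.isIn "f'" line

-- A's single-split block (the body of `result = …` after `delimiter` is chosen),
-- transliterated statement by statement; Python's .index/.rindex/[i] are ported via
-- find/rfind/pyGet? (exact here: inside the f-string branch the substring exists).
def fixACore (line : String) (indent : String) (delimiter : String) : String :=
  let max_segment_length : Int := 88 - PySem.Str.len indent - 3
  let string_start : Int := PySem.Str.find line ("f" ++ delimiter) + 2
  let string_end : Int := PySem.Str.rfind line delimiter
  let prefixPart : String := PySem.Str.slice line none (some (string_start - 2))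
  let suffix' : String := PySem.Str.slice line (some (string_end + 1)) none
  let content : String := PySem.Str.slice line (some string_start) (some string_end)
  let break_points : List Int :=
    (PySem.List.pyRange (min max_segment_length (PySem.Str.len content - 1)) 0 (-1)).foldl
      (fun acc i =>
        if (PySem.Str.pyGet? content i).elim false (fun ch => (" .,;:)]}".toList).contains ch)
        then acc ++ [i + 1] else acc) []
  let break_points : List Int :=
    if break_points.isEmpty then [min max_segment_length (PySem.Str.len content)] else break_points
  let break_point : Int := break_points.headD 0
  let first_part : String := PySem.Str.slice content none (some break_point)
  let second_part : String := PySem.Str.slice content (some break_point) none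
  let fs : String × String :=
    if PySem.Str.isIn "{" first_part && !(PySem.Str.isIn "}" first_part) then
      let brace_pos : Int := PySem.Str.find second_part "}"
      if 0 ≤ brace_pos then
        let brace_pos : Int := brace_pos + 1
        (first_part ++ PySem.Str.slice second_part none (some brace_pos),
         PySem.Str.slice second_part (some brace_pos) none)
      else (first_part, second_part)
    else (first_part, second_part)
  prefixPart ++ "f" ++ delimiter ++ fs.1 ++ delimiter ++ " \\\n" ++ indent ++ "f" ++ delimiter
    ++ fs.2 ++ delimiter ++ suffix'

def fixAResult (line : String) (indent : String) : String :=
  fixACore line indent (if PySem.Str.isIn "f\"" line then "\"" else "'")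

-- Literal port of A's function. A is genuinely partial (its self-recursion can be
-- infinite, a RecursionError in Python), so the recursion is driven by fuel; whenever
-- the Python recursion terminates it consumes at least one character of the f-string
-- content per level, so fuel line.length + 3 is never exhausted on those inputs.
def fixAGo (indent : String) : Nat → String → String
  | 0, line => line   -- fuel exhausted (only reachable where the Python recursion never terminates)
  | fuel+1, line =>
    if pvHasF line then
      let result := fixAResult line indent
      let split_lines := (PySem.Str.split? result "\n").getD []
      let last_line := split_lines.getLastD ""
      if 88 < PySem.Str.len last_line then
        let fixed_last_line := fixAGo indent fuel last_line
        if PySem.Str.isIn "\n" fixed_last_line then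
          PySem.Str.join "\n" (split_lines.dropLast ++ (PySem.Str.split? fixed_last_line "\n").getD [])
        else
          PySem.Str.join "\n" (split_lines.dropLast ++ [fixed_last_line])
      else result
    else line

def fix_fstring_line (line : String) (indent : String) : String :=
  fixAGo indent (line.toList.length + 3) line

-- ===== PORT B =====
-- str.partition / str.rpartition, ported by hand via find/rfind (exact: Python's
-- partition splits at the first occurrence of sep, rpartition at the last).
def pvPartition (s : String) (sep : String) : String × String × String :=
  let i := PySem.Str.find s sep
  if 0 ≤ i then
    (PySem.Str.slice s none (some i), sep, PySem.Str.slice s (some (i + PySem.Str.len sep)) none)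
  else (s, "", "")

def pvRPartition (s : String) (sep : String) : String × String × String :=
  let i := PySem.Str.rfind s sep
  if 0 ≤ i then
    (PySem.Str.slice s none (some i), sep, PySem.Str.slice s (some (i + PySem.Str.len sep)) none)
  else ("", "", s)

def pvIsBreakChar (content : String) (i : Int) : Bool :=
  match PySem.Str.pyGet? content i with
  | some ch => (" .,;:)]}".toList).contains ch
  | none => false

-- B's `while i > 0` early-return scan, descending from the start index.
def pvBreakScan (content : String) : Nat → Option Int
  | 0 => none
  | n+1 =>
    if pvIsBreakChar content ((n+1 : Nat) : Int) then some (((n+1 : Nat) : Int) + 1)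
    else pvBreakScan content n

def pvBreakIndex (content : String) (limit : Int) : Int :=
  match pvBreakScan content (min limit (PySem.Str.len content - 1)).toNat with
  | some b => b
  | none => min limit (PySem.Str.len content)

-- B's single split: partition off the prefix, rpartition off the suffix, scan for the
-- break index, then partition the tail on '}' for the brace fixup.
def pvSplitCore (line : String) (indent : String) (delimiter : String) : String :=
  let p1 := pvPartition line ("f" ++ delimiter)
  let p2 := pvRPartition p1.2.2 delimiter
  let content := p2.1
  let bp := pvBreakIndex content (88 - PySem.Str.len indent - 3)
  let first := PySem.Str.slice content none (some bp)
  let second := PySem.Str.slice content (some bp) none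
  let p3 := pvPartition second "}"
  let fs : String × String :=
    if PySem.Str.isIn "{" first && !(PySem.Str.isIn "}" first) && p3.2.1 != "" then
      (first ++ p3.1 ++ p3.2.1, p3.2.2)
    else (first, second)
  p1.1 ++ "f" ++ delimiter ++ fs.1 ++ delimiter ++ " \\\n" ++ indent ++ "f" ++ delimiter
    ++ fs.2 ++ delimiter ++ p2.2.2

def pvSplitOnce (line : String) (indent : String) : String :=
  pvSplitCore line indent (if PySem.Str.isIn "f\"" line then "\"" else "'")

-- B's while-loop: `done` holds the finalized lines, `current` is split once per
-- iteration.  The loop, too, is genuinely partial in Python, hence fuel (never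
-- exhausted where the Python loop terminates).
-- 'f"' not in line and "f'" not in line  (B's own guard, as written in Source B)
def pvNoF (line : String) : Bool :=
  !PySem.Str.isIn "f\"" line && !PySem.Str.isIn "f'" line

def fixBGo (indent : String) : Nat → List String → String → String
  | 0, done, cur => PySem.Str.join "\n" (done ++ (PySem.Str.split? cur "\n").getD [])   -- fuel exhausted (only reachable where the Python loop never terminates)
  | fuel+1, done, cur =>
    let parts := (PySem.Str.split? (pvSplitOnce cur indent) "\n").getD []
    let done' := done ++ parts.dropLast
    let cur' := parts.getLastD ""
    if PySem.Str.len cur' ≤ 88 ∨ pvNoF cur' = true then PySem.Str.join "\n" (done' ++ [cur'])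
    else fixBGo indent fuel done' cur'

def fix_fstring_line_alt (line : String) (indent : String) : String :=
  if pvNoF line = true then line
  else fixBGo indent (line.toList.length + 3) [] line

-- ===== PRECONDITION & SPEC =====
def Spec_fix_fstring_line (line : String) (indent : String) (out : String) : Prop := out = fix_fstring_line_alt line indent
instance (line : String) (indent : String) (out : String) : Decidable (Spec_fix_fstring_line line indent out) := by unfold Spec_fix_fstring_line; infer_instance

-- ===== CLAIM (what is proved, stated in full; the proofs are below) =====
def Claim_equal_fix_fstring_line : Prop := ∀ (line : String) (indent : String), Dom_fix_fstring_line line indent → Spec_fix_fstring_line line indent (fix_fstring_line line indent)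

-- ===== LEMMAS AND PROOFS =====

theorem str_ext (a b : String) (h : a.toList = b.toList) : a = b := by
  have := congrArg String.ofList h
  rwa [String.ofList_toList, String.ofList_toList] at this

-- ---- break-point equality: A's collect-all-then-head foldl = B's early-return scan ----

theorem drop_add {al : Type} (l : List al) (a b : Nat) :
    List.drop (a + b) l = List.drop b (List.drop a l) := by
  rw [List.drop_drop, Nat.add_comm]

theorem pyRange_desc (n : Nat) :
    PySem.List.pyRange (n : Int) 0 (-1)
      = (List.range n).map (fun k : Nat => (n : Int) - (k : Int)) := by
  have h1 : ¬ ((-1 : Int) = 0) := by norm_num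
  have h2 : ¬ ((0 : Int) < -1) := by norm_num
  cases n with
  | zero => simp [PySem.List.pyRange, h1]
  | succ m =>
      simp only [PySem.List.pyRange, if_neg h1, if_neg h2]
      rw [if_pos (by positivity : (0 : Int) < ((m + 1 : Nat) : Int))]
      rw [show ((((m + 1 : Nat) : Int) - 0 + -(-1) - 1) / -(-1)).toNat = m + 1 by norm_num]
      apply List.map_congr_left
      intro k _
      push_cast
      ring

theorem pyRange_desc_neg (s : Int) (h : s ≤ 0) : PySem.List.pyRange s 0 (-1) = [] := by
  unfold PySem.List.pyRange
  rw [if_neg (by norm_num : ¬ (-1 : Int) = 0), if_neg (by norm_num : ¬ (0 : Int) < -1),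
    if_neg (by omega : ¬ (0 : Int) < s)]
  simp

theorem pyRange_desc_succ (n : Nat) :
    PySem.List.pyRange ((n+1 : Nat) : Int) 0 (-1) =
      ((n+1 : Nat) : Int) :: PySem.List.pyRange (n : Int) 0 (-1) := by
  rw [pyRange_desc, pyRange_desc, List.range_succ_eq_map, List.map_cons, List.map_map]
  refine congrArg₂ List.cons (by push_cast; ring) ?_
  apply List.map_congr_left
  intro k _
  simp only [Function.comp_apply]
  push_cast
  ring

theorem breakScan_eq (content : String) (n : Nat) :
    pvBreakScan content n =
      (((PySem.List.pyRange (n : Int) 0 (-1)).filter (pvIsBreakChar content)).map (· + 1)).head? := by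
  induction n with
  | zero => simp [pvBreakScan]
  | succ m ih =>
      rw [pvBreakScan, pyRange_desc_succ]
      by_cases hb : pvIsBreakChar content ((m + 1 : Nat) : Int) = true
      · rw [if_pos hb, List.filter_cons_of_pos hb, List.map_cons, List.head?_cons]
      · rw [if_neg hb, List.filter_cons_of_neg (by simpa using hb), ih]

theorem bp_eq (content : String) (limit : Int) :
    (if ((PySem.List.pyRange (min limit (PySem.Str.len content - 1)) 0 (-1)).foldl
          (fun acc i =>
            if (PySem.Str.pyGet? content i).elim false (fun ch => (" .,;:)]}".toList).contains ch)
            then acc ++ [i + 1] else acc) []).isEmpty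
     then [min limit (PySem.Str.len content)]
     else ((PySem.List.pyRange (min limit (PySem.Str.len content - 1)) 0 (-1)).foldl
          (fun acc i =>
            if (PySem.Str.pyGet? content i).elim false (fun ch => (" .,;:)]}".toList).contains ch)
            then acc ++ [i + 1] else acc) [])).headD 0
    = pvBreakIndex content limit := by
  have hP : (fun (acc : List Int) (i : Int) =>
        if (PySem.Str.pyGet? content i).elim false (fun ch => (" .,;:)]}".toList).contains ch)
        then acc ++ [i + 1] else acc)
      = (fun (acc : List Int) (i : Int) => if pvIsBreakChar content i then acc ++ [i + 1] else acc) := by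
    funext acc i
    unfold pvIsBreakChar
    cases PySem.Str.pyGet? content i <;> simp
  rw [hP, PySem.List.foldl_append_if (pvIsBreakChar content) (· + 1)]
  unfold pvBreakIndex
  rw [breakScan_eq]
  have hrange : PySem.List.pyRange (min limit (PySem.Str.len content - 1)) 0 (-1)
      = PySem.List.pyRange (((min limit (PySem.Str.len content - 1)).toNat : Nat) : Int) 0 (-1) := by
    by_cases h0 : 0 ≤ min limit (PySem.Str.len content - 1)
    · rw [Int.toNat_of_nonneg h0]
    · rw [pyRange_desc_neg _ (by omega), pyRange_desc_neg _ (by omega)]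
  rw [← hrange]
  cases hres : ((PySem.List.pyRange (min limit (PySem.Str.len content - 1)) 0 (-1)).filter
      (pvIsBreakChar content)).map (· + 1) with
  | nil => simp
  | cons b r => simp

-- ---- rfind characterisation (rfind.go finds the HIGHEST matching index) ----

theorem rfind_go_zero (s sub : List Char) :
    PySem.Chars.rfind.go s sub 0 = if sub.isPrefixOf s then 0 else -1 := rfl

theorem rfind_go_succ (s sub : List Char) (j : Nat) :
    PySem.Chars.rfind.go s sub (j+1) =
      if sub.isPrefixOf (s.drop (j+1)) then ((j : Int) + 1) else PySem.Chars.rfind.go s sub j := by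
  rfl

theorem rfind_go_eq_of (s sub : List Char) (k : Nat) :
    ∀ n : Nat, k ≤ n → sub.isPrefixOf (s.drop k) = true →
      (∀ j, k < j → j ≤ n → sub.isPrefixOf (s.drop j) = false) →
      PySem.Chars.rfind.go s sub n = k := by
  intro n
  induction n with
  | zero =>
      intro hk h1 _
      interval_cases k
      rw [rfind_go_zero]
      simp at h1
      simp [h1]
  | succ m ih =>
      intro hk h1 h2
      rw [rfind_go_succ]
      by_cases he : k = m + 1
      · subst he
        rw [if_pos h1]
        push_cast
        ring
      · rw [if_neg (by rw [h2 (m+1) (by omega) (by omega)]; simp)]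
        exact ih (by omega) h1 (fun j hj1 hj2 => h2 j hj1 (by omega))

theorem rfind_go_neg (s sub : List Char) :
    ∀ n : Nat, (∀ j, j ≤ n → sub.isPrefixOf (s.drop j) = false) →
      PySem.Chars.rfind.go s sub n = -1 := by
  intro n
  induction n with
  | zero =>
      intro h
      rw [rfind_go_zero]
      have := h 0 (by omega)
      simp at this
      simp [this]
  | succ m ih =>
      intro h
      rw [rfind_go_succ, if_neg (by rw [h (m+1) (by omega)]; simp)]
      exact ih (fun j hj => h j (by omega))

theorem rfind_go_cases (s sub : List Char) (n : Nat) :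
    (∀ j, j ≤ n → sub.isPrefixOf (s.drop j) = false) ∨
      (∃ k : Nat, k ≤ n ∧ sub.isPrefixOf (s.drop k) = true ∧
        ∀ j, k < j → j ≤ n → sub.isPrefixOf (s.drop j) = false) := by
  induction n with
  | zero =>
      cases h : sub.isPrefixOf (s.drop 0) with
      | false => exact Or.inl (fun j hj => by interval_cases j; exact h)
      | true => exact Or.inr ⟨0, by omega, h, fun j hj1 hj2 => by omega⟩
  | succ m ih =>
      cases h : sub.isPrefixOf (s.drop (m+1)) with
      | true => exact Or.inr ⟨m+1, by omega, h, fun j hj1 hj2 => by omega⟩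
      | false =>
          rcases ih with hneg | ⟨k, hk1, hk2, hk3⟩
          · refine Or.inl (fun j hj => ?_)
            by_cases hj' : j = m + 1
            · subst hj'; exact h
            · exact hneg j (by omega)
          · refine Or.inr ⟨k, by omega, hk2, fun j hj1 hj2 => ?_⟩
            by_cases hj' : j = m + 1
            · subst hj'; exact h
            · exact hk3 j hj1 (by omega)

-- ---- the single-split cores agree ----

theorem brace_eq (first second : String) :
    (if PySem.Str.isIn "{" first && !(PySem.Str.isIn "}" first) then
       if 0 ≤ PySem.Str.find second "}" then
         (first ++ PySem.Str.slice second none (some (PySem.Str.find second "}" + 1)),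
          PySem.Str.slice second (some (PySem.Str.find second "}" + 1)) none)
       else (first, second)
     else (first, second))
    = (if PySem.Str.isIn "{" first && !(PySem.Str.isIn "}" first) && (pvPartition second "}").2.1 != "" then
         (first ++ (pvPartition second "}").1 ++ (pvPartition second "}").2.1, (pvPartition second "}").2.2)
       else (first, second)) := by
  unfold pvPartition
  by_cases hb : 0 ≤ PySem.Str.find second "}"
  · rw [if_pos hb, if_pos hb]
    dsimp only
    rw [show (("}" : String) != "") = true from by decide, Bool.and_true]
    by_cases hg : (PySem.Str.isIn "{" first && !(PySem.Str.isIn "}" first)) = true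
    · rw [if_pos hg, if_pos hg]
      rw [show PySem.Str.len ("}" : String) = 1 from by decide]
      obtain ⟨k, hk⟩ : ∃ k : Nat, PySem.Str.find second "}" = (k : Int) :=
        ⟨_, (Int.toNat_of_nonneg hb).symm⟩
      have hfc : PySem.Chars.find second.toList ['}'] = (k : Int) := by
        rw [← show ("}" : String).toList = ['}'] from by decide, ← PySem.Str.find_eq, hk]
      have hb' : 0 ≤ PySem.Chars.find second.toList ['}'] := by
        rw [hfc]; positivity
      have hgetk : second.toList[k]? = some '}' := by
        have hp := (PySem.Chars.find_spec hb').1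
        rw [hfc, Int.toNat_natCast] at hp
        rcases hp with ⟨u, hu⟩
        rw [← List.head?_drop, ← hu]
        rfl
      refine congrArg₂ Prod.mk ?_ rfl
      rw [String.append_assoc]
      refine congrArg (first ++ ·) ?_
      apply str_ext
      rw [hk]
      simp [PySem.List.slice_to_natCast]
      rw [show ((k : Nat) : Int) + 1 = ((k + 1 : Nat) : Int) by push_cast; ring,
        PySem.List.slice_to_natCast, List.take_add_one, hgetk]
      rfl
    · rw [if_neg hg, if_neg hg]
  · rw [if_neg hb, if_neg hb]
    dsimp only
    rw [show (("" : String) != "") = false from by decide, Bool.and_false]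
    simp

theorem pvCore_eq (line indent delim : String) (d : Char) (hd : delim.toList = [d])
    (hIn : PySem.Str.isIn ("f" ++ delim) line = true) :
    fixACore line indent delim = pvSplitCore line indent delim := by
  have hfd : ("f" ++ delim).toList = ['f', d] := by simp [hd]
  have hlenfd : PySem.Str.len ("f" ++ delim) = 2 := by simp [hfd]
  have hlend : PySem.Str.len delim = 1 := by simp [hd]
  have hiC : PySem.Str.find line ("f" ++ delim) = PySem.Chars.find line.toList ['f', d] := by
    rw [PySem.Str.find_eq, hfd]
  have hInC : PySem.Chars.isIn ['f', d] line.toList = true := by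
    rw [PySem.Str.isIn_eq, hfd] at hIn
    exact hIn
  have hi0 : 0 ≤ PySem.Chars.find line.toList ['f', d] :=
    (PySem.Chars.find_nonneg_iff _ _).mpr ((PySem.Chars.isIn_iff_infix _ _).mp hInC)
  obtain ⟨n, hn⟩ : ∃ n : Nat, PySem.Chars.find line.toList ['f', d] = (n : Int) :=
    ⟨_, (Int.toNat_of_nonneg hi0).symm⟩
  have hfind0 : 0 ≤ PySem.Str.find line ("f" ++ delim) := by rw [hiC]; exact hi0
  have hpre2 : ['f', d] <+: line.toList.drop n := by
    have h := (PySem.Chars.find_spec hi0).1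
    rwa [hn, Int.toNat_natCast] at h
  obtain ⟨t, ht⟩ : ∃ t, line.toList.drop n = 'f' :: d :: t := by
    obtain ⟨u, hu⟩ := hpre2
    exact ⟨u, hu.symm⟩
  have hlen2 : n + 2 ≤ line.toList.length := by
    have h := congrArg List.length ht
    rw [List.length_drop] at h
    simp only [List.length_cons] at h
    omega
  have hdrop2 : line.toList.drop (n + 2) = t := by
    rw [drop_add line.toList n 2, ht]
    rfl
  have htlen : t.length = line.toList.length - (n + 2) := by
    rw [← hdrop2, List.length_drop]
  set R : String := PySem.Str.slice line (some (PySem.Str.find line ("f" ++ delim) + 2)) none with hRdef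
  have hRlist : R.toList = t := by
    rw [hRdef, PySem.Str.toList_slice, PySem.Chars.slice_eq_listSlice, hiC, hn,
      show (n : Int) + 2 = ((n + 2 : Nat) : Int) by push_cast; ring,
      PySem.List.slice_from_natCast]
    exact hdrop2
  have hp1a : (pvPartition line ("f" ++ delim)).1
      = PySem.Str.slice line none (some (PySem.Str.find line ("f" ++ delim))) := by
    unfold pvPartition
    rw [if_pos hfind0]
  have hp1c : (pvPartition line ("f" ++ delim)).2.2 = R := by
    unfold pvPartition
    rw [if_pos hfind0]
    dsimp only
    rw [hlenfd, hRdef]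
  have hprefixA : PySem.Str.find line ("f" ++ delim) + 2 - 2
      = PySem.Str.find line ("f" ++ delim) := by ring
  have hrfR : PySem.Str.rfind R delim = PySem.Chars.rfind t [d] := by
    rw [PySem.Str.rfind_eq, hRlist, hd]
  have hrfL : PySem.Str.rfind line delim = PySem.Chars.rfind line.toList [d] := by
    rw [PySem.Str.rfind_eq, hd]
  rcases rfind_go_cases t [d] t.length with hneg | ⟨k, hk_le, hkpre, hkmax⟩
  · -- the delimiter does not occur after the opener: rindex hits the opener itself
    have hm : PySem.Chars.rfind t [d] = -1 := rfind_go_neg t [d] t.length (fun j hj => hneg j hj)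
    have hse : PySem.Chars.rfind line.toList [d] = ((n + 1 : Nat) : Int) := by
      have hgo : PySem.Chars.rfind line.toList [d]
          = PySem.Chars.rfind.go line.toList [d] line.toList.length := rfl
      rw [hgo]
      apply rfind_go_eq_of
      · omega
      · have hd1 : line.toList.drop (n + 1) = d :: t := by
          rw [drop_add line.toList n 1, ht]
          rfl
        rw [hd1]
        exact List.isPrefixOf_iff_prefix.mpr ⟨t, rfl⟩
      · intro j hj1 hj2
        rw [show j = (n + 2) + (j - (n + 2)) by omega, drop_add, hdrop2]
        exact hneg (j - (n + 2)) (by omega)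
    have hb0 : ¬ 0 ≤ PySem.Str.rfind R delim := by
      rw [hrfR, hm]; norm_num
    have hp2a : (pvRPartition R delim).1 = ("" : String) := by
      unfold pvRPartition
      rw [if_neg hb0]
    have hp2c : (pvRPartition R delim).2.2 = R := by
      unfold pvRPartition
      rw [if_neg hb0]
    have hcontentA : PySem.Str.slice line (some (PySem.Str.find line ("f" ++ delim) + 2))
        (some (PySem.Str.rfind line delim)) = ("" : String) := by
      apply str_ext
      rw [PySem.Str.toList_slice, PySem.Chars.slice_eq_listSlice, hiC, hn, hrfL, hse,
        show (n : Int) + 2 = ((n + 2 : Nat) : Int) by push_cast; ring,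
        PySem.List.slice_natCast, show (n + 1) - (n + 2) = 0 by omega]
      simp
    have hsuffixA : PySem.Str.slice line (some (PySem.Str.rfind line delim + 1)) none = R := by
      apply str_ext
      rw [PySem.Str.toList_slice, PySem.Chars.slice_eq_listSlice, hrfL, hse,
        show ((n + 1 : Nat) : Int) + 1 = ((n + 2 : Nat) : Int) by push_cast; ring,
        PySem.List.slice_from_natCast, hdrop2, hRlist]
    simp only [fixACore, pvSplitCore]
    rw [hp1a, hp1c, hp2a, hp2c, hprefixA, hcontentA, hsuffixA, bp_eq, brace_eq]
  · -- the delimiter occurs in the rest: rindex finds its last occurrence there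
    have hm : PySem.Chars.rfind t [d] = (k : Int) := by
      have hgo : PySem.Chars.rfind t [d] = PySem.Chars.rfind.go t [d] t.length := rfl
      rw [hgo]
      exact rfind_go_eq_of t [d] k t.length hk_le hkpre hkmax
    have hkt : k < t.length := by
      rcases List.isPrefixOf_iff_prefix.mp hkpre with ⟨u, hu⟩
      have h3 : 0 < (t.drop k).length := by rw [← hu]; simp
      rw [List.length_drop] at h3
      omega
    have hse : PySem.Chars.rfind line.toList [d] = ((n + 2 + k : Nat) : Int) := by
      have hgo : PySem.Chars.rfind line.toList [d]
          = PySem.Chars.rfind.go line.toList [d] line.toList.length := rfl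
      rw [hgo]
      apply rfind_go_eq_of
      · omega
      · rw [show n + 2 + k = (n + 2) + k by omega, drop_add, hdrop2]
        exact hkpre
      · intro j hj1 hj2
        rw [show j = (n + 2) + (j - (n + 2)) by omega, drop_add, hdrop2]
        exact hkmax (j - (n + 2)) (by omega) (by omega)
    have hb0 : 0 ≤ PySem.Str.rfind R delim := by
      rw [hrfR, hm]; positivity
    have hp2a : (pvRPartition R delim).1
        = PySem.Str.slice line (some (PySem.Str.find line ("f" ++ delim) + 2))
            (some (PySem.Str.rfind line delim)) := by
      unfold pvRPartition
      rw [if_pos hb0]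
      dsimp only
      apply str_ext
      rw [PySem.Str.toList_slice, PySem.Chars.slice_eq_listSlice, hrfR, hm,
        PySem.List.slice_to_natCast, hRlist]
      rw [PySem.Str.toList_slice, PySem.Chars.slice_eq_listSlice, hiC, hn, hrfL, hse,
        show (n : Int) + 2 = ((n + 2 : Nat) : Int) by push_cast; ring,
        PySem.List.slice_natCast, hdrop2, show n + 2 + k - (n + 2) = k by omega]
    have hp2c : (pvRPartition R delim).2.2
        = PySem.Str.slice line (some (PySem.Str.rfind line delim + 1)) none := by
      unfold pvRPartition
      rw [if_pos hb0]
      dsimp only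
      rw [hlend]
      apply str_ext
      rw [PySem.Str.toList_slice, PySem.Chars.slice_eq_listSlice, hrfR, hm,
        show (k : Int) + 1 = ((k + 1 : Nat) : Int) by push_cast; ring,
        PySem.List.slice_from_natCast, hRlist]
      rw [PySem.Str.toList_slice, PySem.Chars.slice_eq_listSlice, hrfL, hse,
        show ((n + 2 + k : Nat) : Int) + 1 = (((n + 2) + (k + 1) : Nat) : Int) by push_cast; ring,
        PySem.List.slice_from_natCast, drop_add line.toList (n + 2) (k + 1), hdrop2]
    simp only [fixACore, pvSplitCore]
    rw [hp1a, hp1c, hp2a, hp2c, hprefixA, bp_eq, brace_eq]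

theorem splitOnce_eq (line indent : String) (h : pvHasF line = true) :
    fixAResult line indent = pvSplitOnce line indent := by
  unfold fixAResult pvSplitOnce pvHasF at *
  cases h1 : PySem.Str.isIn "f\"" line with
  | true =>
      simp only [if_true]
      exact pvCore_eq line indent "\"" '"' (by decide)
        (by rw [show ("f" ++ "\"" : String) = "f\"" from by decide]; exact h1)
  | false =>
      rw [h1] at h
      simp only [Bool.false_or] at h
      simp only [Bool.false_eq_true, if_false]
      exact pvCore_eq line indent "'" '\'' (by decide)
        (by rw [show ("f" ++ "'" : String) = "f'" from by decide]; exact h)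

-- ---- split/join infrastructure (Python str.split('\n') / '\n'.join) ----

def spN : List Char → List (List Char)
  | [] => [[]]
  | a :: l => if a = '\n' then [] :: spN l else (spN l).modifyHead (a :: ·)

theorem modifyHead_id' {α : Type} (l : List α) : List.modifyHead (fun x => x) l = l := by
  cases l <;> simp

theorem go_spec (fuel : Nat) (l cur : List Char) (acc : List (List Char)) (h : l.length < fuel) :
  PySem.Chars.splitOn.go ['\n'] fuel l cur acc =
    acc.reverse ++ (spN l).modifyHead (cur.reverse ++ ·) := by
  induction fuel generalizing l cur acc with
  | zero => omega
  | succ fuel ih =>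
    cases l with
    | nil =>
        simp [PySem.Chars.splitOn.go, spN]
    | cons c rest =>
        by_cases hc : c = '\n'
        · subst hc
          rw [show PySem.Chars.splitOn.go ['\n'] (fuel+1) ('\n' :: rest) cur acc =
              PySem.Chars.splitOn.go ['\n'] fuel (List.drop 1 ('\n'::rest)) [] (cur.reverse :: acc) by
            simp [PySem.Chars.splitOn.go]]
          rw [ih _ _ _ (by simp at h ⊢; omega)]
          simp [spN, modifyHead_id']
        · rw [show PySem.Chars.splitOn.go ['\n'] (fuel+1) (c :: rest) cur acc =
              PySem.Chars.splitOn.go ['\n'] fuel rest (c :: cur) acc by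
            simp [PySem.Chars.splitOn.go, List.isPrefixOf, Ne.symm hc]]
          rw [ih _ _ _ (by simp at h ⊢; omega)]
          simp only [spN, if_neg hc, List.modifyHead_modifyHead]
          have hf : ((fun x => cur.reverse ++ x) ∘ fun x => c :: x) = fun x => (c :: cur).reverse ++ x := by
            funext x; simp
          rw [hf]

theorem chars_splitOn_eq (l : List Char) : PySem.Chars.splitOn l ['\n'] = spN l := by
  rw [PySem.Chars.splitOn, go_spec _ _ _ _ (by omega)]
  simp [modifyHead_id']

theorem spN_ne_nil (l : List Char) : spN l ≠ [] := by
  induction l with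
  | nil => simp [spN]
  | cons a l ih =>
      by_cases hc : a = '\n' <;> simp [spN, hc]
      cases hl : spN l with
      | nil => exact absurd hl ih
      | cons b r => simp

theorem mem_spN_no_nl (l : List Char) : ∀ p ∈ spN l, '\n' ∉ p := by
  induction l with
  | nil => simp [spN]
  | cons a l ih =>
      by_cases hc : a = '\n'
      · simp [spN, hc]; exact ih
      · intro p hp
        rw [spN, if_neg hc] at hp
        cases hl : spN l with
        | nil => exact absurd hl (spN_ne_nil l)
        | cons b rest =>
            rw [hl] at hp
            simp at hp
            rcases hp with rfl | hp
            · have hb : '\n' ∉ b := ih b (by rw [hl]; exact List.mem_cons_self ..)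
              simp [hb]
              exact fun hh => hc hh.symm
            · exact ih p (by rw [hl]; exact List.mem_cons_of_mem _ hp)

theorem join_spN (l : List Char) : PySem.Chars.join ['\n'] (spN l) = l := by
  induction l with
  | nil => simp [spN, PySem.Chars.join_singleton]
  | cons a l ih =>
      by_cases hc : a = '\n'
      · subst hc
        rw [spN, if_pos rfl]
        cases hl : spN l with
        | nil => exact absurd hl (spN_ne_nil l)
        | cons b rest =>
            rw [PySem.Chars.join_cons_cons, ← hl, ih]; simp
      · rw [spN, if_neg hc]
        cases hl : spN l with
        | nil => exact absurd hl (spN_ne_nil l)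
        | cons b rest =>
            rw [hl] at ih
            cases rest with
            | nil =>
                simp only [List.modifyHead, PySem.Chars.join_singleton] at ih ⊢
                simp [ih]
            | cons d rest2 =>
                simp only [List.modifyHead]
                rw [PySem.Chars.join_cons_cons] at ih ⊢
                simp only [List.cons_append, List.append_assoc] at ih ⊢
                rw [ih]

theorem spN_of_no_nl (l : List Char) (h : '\n' ∉ l) : spN l = [l] := by
  induction l with
  | nil => simp [spN]
  | cons a l ih =>
      simp at h
      rw [spN, if_neg (fun hh => h.1 hh.symm), ih h.2]
      simp

theorem spN_append_nl (p t : List Char) (h : '\n' ∉ p) : spN (p ++ '\n' :: t) = p :: spN t := by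
  induction p with
  | nil => simp [spN]
  | cons a p ih =>
      simp at h
      rw [List.cons_append, spN, if_neg (fun hh => h.1 hh.symm), ih h.2]
      simp

theorem spN_join (xs : List (List Char)) (hne : xs ≠ []) (h : ∀ p ∈ xs, '\n' ∉ p) :
    spN (PySem.Chars.join ['\n'] xs) = xs := by
  induction xs with
  | nil => exact absurd rfl hne
  | cons p rest ih =>
      cases rest with
      | nil => rw [PySem.Chars.join_singleton, spN_of_no_nl _ (h p (by simp))]
      | cons q rest2 =>
          rw [PySem.Chars.join_cons_cons]
          have : p ++ ['\n'] ++ PySem.Chars.join ['\n'] (q :: rest2) =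
              p ++ '\n' :: PySem.Chars.join ['\n'] (q :: rest2) := by simp
          rw [this, spN_append_nl _ _ (h p (by simp)), ih (by simp) (fun r hr => h r (List.mem_cons_of_mem _ hr))]

theorem splitS_eq (s : String) :
    (PySem.Str.split? s "\n").getD [] = (spN s.toList).map String.ofList := by
  have h : ("\n" : String).toList = ['\n'] := by decide
  simp [PySem.Str.split?, PySem.Chars.split?, chars_splitOn_eq, h]

theorem joinS_eq (xs : List String) :
    PySem.Str.join "\n" xs = String.ofList (PySem.Chars.join ['\n'] (xs.map String.toList)) := by
  have h : ("\n" : String).toList = ['\n'] := by decide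
  simp [PySem.Str.join, h]

theorem join_split (s : String) :
    PySem.Str.join "\n" ((PySem.Str.split? s "\n").getD []) = s := by
  rw [splitS_eq, joinS_eq]
  have : ((spN s.toList).map String.ofList).map String.toList = spN s.toList := by
    simp [List.map_map, Function.comp_def]
  rw [this, join_spN, String.ofList_toList]

theorem singleton_infix_iff (c : Char) (l : List Char) : [c] <:+: l ↔ c ∈ l := by
  constructor
  · intro h
    exact h.subset (by simp)
  · intro h
    obtain ⟨u, v, rfl⟩ := List.append_of_mem h
    exact ⟨u, v, by simp⟩

theorem isIn_nl_false_iff (x : String) : PySem.Str.isIn "\n" x = false ↔ '\n' ∉ x.toList := by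
  have h : ("\n" : String).toList = ['\n'] := by decide
  rw [show PySem.Str.isIn "\n" x = PySem.Chars.isIn ['\n'] x.toList by simp [PySem.Str.isIn_eq, h]]
  rw [PySem.Chars.isIn_eq_false_iff, singleton_infix_iff]

theorem split_join (xs : List String) (hne : xs ≠ [])
    (h : ∀ x ∈ xs, PySem.Str.isIn "\n" x = false) :
    (PySem.Str.split? (PySem.Str.join "\n" xs) "\n").getD [] = xs := by
  rw [joinS_eq, splitS_eq, String.toList_ofList, spN_join]
  · simp [List.map_map, Function.comp_def]
  · simp [hne]
  · intro p hp
    simp at hp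
    obtain ⟨x, hx, rfl⟩ := hp
    exact (isIn_nl_false_iff x).mp (h x hx)

theorem split_ne_nil (s : String) : (PySem.Str.split? s "\n").getD [] ≠ [] := by
  rw [splitS_eq]
  simp [spN_ne_nil]

theorem mem_split_no_nl (s : String) :
    ∀ x ∈ (PySem.Str.split? s "\n").getD [], PySem.Str.isIn "\n" x = false := by
  intro x hx
  rw [splitS_eq] at hx
  simp at hx
  obtain ⟨p, hp, rfl⟩ := hx
  rw [isIn_nl_false_iff, String.toList_ofList]
  exact mem_spN_no_nl s.toList p hp

theorem split_of_no_nl (s : String) (h : PySem.Str.isIn "\n" s = false) :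
    (PySem.Str.split? s "\n").getD [] = [s] := by
  rw [splitS_eq, spN_of_no_nl _ ((isIn_nl_false_iff s).mp h)]
  simp [String.ofList_toList]

theorem getLastD_mem {α : Type} (l : List α) (d : α) (h : l ≠ []) : l.getLastD d ∈ l := by
  induction l with
  | nil => exact absurd rfl h
  | cons a l ih =>
      cases l with
      | nil => simp
      | cons b r =>
          rw [List.getLastD_eq_getLast?, List.getLast?_cons_cons, ← List.getLastD_eq_getLast?]
          exact List.mem_cons_of_mem _ (ih (by simp))

theorem dropLast_append_getLastD {α : Type} (l : List α) (d : α) (h : l ≠ []) :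
    l.dropLast ++ [l.getLastD d] = l := by
  induction l with
  | nil => exact absurd rfl h
  | cons a l ih =>
      cases l with
      | nil => simp
      | cons b r =>
          rw [List.getLastD_eq_getLast?, List.getLast?_cons_cons, ← List.getLastD_eq_getLast?]
          simpa using ih (by simp)

-- ---- the recursion/loop correspondence ----

theorem fixAGo_of_not_hasF (indent : String) (n : Nat) (l : String) (h : pvHasF l = false) :
    fixAGo indent n l = l := by
  cases n with
  | zero => rfl
  | succ n => rw [fixAGo]; simp [h]

theorem fixAGo_succ (indent : String) (n : Nat) (cur : String) :
    fixAGo indent (n+1) cur =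
      if pvHasF cur then
        (if 88 < PySem.Str.len (((PySem.Str.split? (fixAResult cur indent) "\n").getD []).getLastD "") then
          (if PySem.Str.isIn "\n" (fixAGo indent n (((PySem.Str.split? (fixAResult cur indent) "\n").getD []).getLastD "")) then
            PySem.Str.join "\n" (((PySem.Str.split? (fixAResult cur indent) "\n").getD []).dropLast ++
              (PySem.Str.split? (fixAGo indent n (((PySem.Str.split? (fixAResult cur indent) "\n").getD []).getLastD "")) "\n").getD [])
          else
            PySem.Str.join "\n" (((PySem.Str.split? (fixAResult cur indent) "\n").getD []).dropLast ++
              [fixAGo indent n (((PySem.Str.split? (fixAResult cur indent) "\n").getD []).getLastD "")]))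
        else fixAResult cur indent)
      else cur := rfl

theorem pvNoF_eq (s : String) : pvNoF s = !pvHasF s := by
  unfold pvNoF pvHasF
  cases h1 : PySem.Str.isIn "f\"" s <;> cases h2 : PySem.Str.isIn "f'" s <;> simp

theorem fixBGo_succ (indent : String) (n : Nat) (done : List String) (cur : String) :
    fixBGo indent (n+1) done cur =
      (if PySem.Str.len (((PySem.Str.split? (pvSplitOnce cur indent) "\n").getD []).getLastD "") ≤ 88 ∨
          pvNoF (((PySem.Str.split? (pvSplitOnce cur indent) "\n").getD []).getLastD "") = true then
        PySem.Str.join "\n" ((done ++ ((PySem.Str.split? (pvSplitOnce cur indent) "\n").getD []).dropLast) ++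
          [((PySem.Str.split? (pvSplitOnce cur indent) "\n").getD []).getLastD ""])
      else
        fixBGo indent n (done ++ ((PySem.Str.split? (pvSplitOnce cur indent) "\n").getD []).dropLast)
          (((PySem.Str.split? (pvSplitOnce cur indent) "\n").getD []).getLastD "")) := rfl

theorem key_lemma (indent : String) :
    ∀ (n : Nat) (done : List String) (cur : String), pvHasF cur = true →
      fixBGo indent n done cur =
        PySem.Str.join "\n" (done ++ (PySem.Str.split? (fixAGo indent n cur) "\n").getD []) := by
  intro n
  induction n with
  | zero => intro done cur _; rfl
  | succ n ih =>
    intro done cur hcur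
    rw [fixAGo_succ, if_pos hcur, splitOnce_eq cur indent hcur, fixBGo_succ]
    generalize hparts : (PySem.Str.split? (pvSplitOnce cur indent) "\n").getD [] = parts
    have hpne : parts ≠ [] := hparts ▸ split_ne_nil (pvSplitOnce cur indent)
    have hall : ∀ x ∈ parts, PySem.Str.isIn "\n" x = false := hparts ▸ mem_split_no_nl (pvSplitOnce cur indent)
    generalize hlast : parts.getLastD "" = lastl
    have hlmem : lastl ∈ parts := hlast ▸ getLastD_mem parts "" hpne
    have hlnl : PySem.Str.isIn "\n" lastl = false := hall lastl hlmem
    have hdnl : ∀ x ∈ parts.dropLast, PySem.Str.isIn "\n" x = false :=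
      fun x hx => hall x ((List.dropLast_sublist parts).subset hx)
    by_cases hbig : 88 < PySem.Str.len lastl
    · by_cases hf : pvHasF lastl = true
      · rw [if_neg (by
            rintro (h | h)
            · omega
            · rw [pvNoF_eq, hf] at h
              exact Bool.false_ne_true h),
          if_pos hbig, ih _ _ hf]
        by_cases hn : PySem.Str.isIn "\n" (fixAGo indent n lastl) = true
        · rw [if_pos hn, split_join (parts.dropLast ++ (PySem.Str.split? (fixAGo indent n lastl) "\n").getD [])
              (by simp [split_ne_nil])
              (by intro x hx
                  rcases List.mem_append.mp hx with h | h
                  · exact hdnl x h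
                  · exact mem_split_no_nl _ x h), List.append_assoc]
        · have hn' : PySem.Str.isIn "\n" (fixAGo indent n lastl) = false := by
            cases hh : PySem.Str.isIn "\n" (fixAGo indent n lastl) with
            | true => exact absurd hh hn
            | false => rfl
          rw [if_neg hn, split_join (parts.dropLast ++ [fixAGo indent n lastl])
              (by simp)
              (by intro x hx
                  rcases List.mem_append.mp hx with h | h
                  · exact hdnl x h
                  · simp at h; subst h; exact hn'), List.append_assoc,
              split_of_no_nl _ hn']
      · rw [if_pos (Or.inr (by
            rw [pvNoF_eq, (by cases hh : pvHasF lastl with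
              | true => exact absurd hh hf
              | false => rfl : pvHasF lastl = false)]
            rfl)), if_pos hbig,
            fixAGo_of_not_hasF indent n lastl (by cases hh : pvHasF lastl with
              | true => exact absurd hh hf
              | false => rfl),
            if_neg (by rw [hlnl]; exact Bool.false_ne_true),
            split_join (parts.dropLast ++ [lastl]) (by simp)
              (by intro x hx
                  rcases List.mem_append.mp hx with h | h
                  · exact hdnl x h
                  · simp at h; subst h; exact hlnl), List.append_assoc]
    · rw [if_pos (Or.inl (by omega)), if_neg hbig]
      have h2 : (done ++ parts.dropLast) ++ [lastl] = done ++ parts := by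
        rw [List.append_assoc, ← hlast, dropLast_append_getLastD parts "" hpne]
      rw [hparts, h2]

-- ===== VERDICT (by name: the statement is the Claim_ definition above) =====
theorem fix_fstring_line_spec : Claim_equal_fix_fstring_line := by
  intro line indent _
  show fix_fstring_line line indent = fix_fstring_line_alt line indent
  unfold fix_fstring_line fix_fstring_line_alt
  cases h : pvHasF line with
  | true =>
      rw [if_neg (by rw [pvNoF_eq, h]; exact Bool.false_ne_true),
        key_lemma indent _ [] line h, List.nil_append, join_split]
  | false =>
      rw [if_pos (by rw [pvNoF_eq, h]; rfl), fixAGo_of_not_hasF indent _ line h]
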